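-- pv_equiv track=rewrite | github.com/rabin64/python-assigment2 | qn10.py | case_converter
-- ===== SOURCE A (Python) =====
-- def case_converter(camelcase, seperator):
--     string = camelcase[0].lower()
--     for letter in camelcase[1:]:
--         if letter.isupper():
--             string += seperator + letter.lower()
--         else:
--            string += letter
--     return string
-- ===== SOURCE B (Python) =====
-- def case_converter(camelcase, seperator):
--     bounds = [0] + [i for i in range(1, len(camelcase)) if camelcase[i].isupper()] + [len(camelcase)]
--     pieces = []
--     for a, b in zip(bounds, bounds[1:]):
--         seg = camelcase[a:b]
--         pieces.append(seg[0].lower() + seg[1:])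
--     return seperator.join(pieces)
-- ===== Notes on version B (the rewrite author's own statement) =====
-- stated objective: alternative
-- what changed: B replaces A's single char-by-char accumulation pass with a staged index-based pipeline: first compute the boundary index list [0]+uppercase indices+[len], then slice the string into segments between adjacent boundaries, lowercase each segment's leading char, and join once with the separator.
-- outside the precondition, e.g. on case_converter('', '_'): A raises IndexError, B raises IndexError
import Mathlib
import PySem

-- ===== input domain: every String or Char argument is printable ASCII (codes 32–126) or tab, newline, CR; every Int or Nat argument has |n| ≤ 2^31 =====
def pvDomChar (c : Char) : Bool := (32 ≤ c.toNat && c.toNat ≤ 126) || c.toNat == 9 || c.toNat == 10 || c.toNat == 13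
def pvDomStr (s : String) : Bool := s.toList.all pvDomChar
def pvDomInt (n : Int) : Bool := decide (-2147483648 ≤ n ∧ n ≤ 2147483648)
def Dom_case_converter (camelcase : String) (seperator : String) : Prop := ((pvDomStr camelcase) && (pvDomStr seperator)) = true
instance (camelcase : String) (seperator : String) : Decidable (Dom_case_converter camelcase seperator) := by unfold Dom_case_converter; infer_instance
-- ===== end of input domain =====

-- B first computes the list of split boundaries (0, every uppercase index, len), then slices the
-- string into segments between adjacent boundaries, lowercases each segment's leading char and
-- joins once — two staged passes over indices instead of A's char-by-char string accumulation.

-- ===== PORT A =====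
-- A over the char list: string = camelcase[0].lower(); then the letter loop with += .
def caseA_core (sep : List Char) : List Char → List Char
  | [] => []        -- Python: camelcase[0] raises IndexError; excluded by Pre_
  | c :: rest =>
      rest.foldl (fun acc letter =>
        if PySem.Chars.isupper letter then acc ++ sep ++ [PySem.Chars.lowerChar letter]
        else acc ++ [letter]) [PySem.Chars.lowerChar c]

def case_converter (camelcase : String) (seperator : String) : String :=
  String.mk (caseA_core seperator.toList camelcase.toList)

-- ===== PORT B =====
-- Source B's boundary list: [0] + [i for i in range(1, len) if camelcase[i].isupper()] + [len].
-- range(1, n) is ported as List.range' 1 (n - 1) (exact: both are [1, …, n-1]).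
def pvUppers (cs : List Char) : List Nat :=
  (List.range' 1 (cs.length - 1)).filter (fun i => PySem.Chars.isupper (cs.getD i ' '))

def pvBounds (cs : List Char) : List Nat := 0 :: (pvUppers cs ++ [cs.length])

-- seg[0].lower() + seg[1:]; [] is unreachable under Pre_ (Python raises IndexError only for "").
def pvLowerHead : List Char → List Char
  | [] => []
  | d :: t => PySem.Chars.lowerChar d :: t

-- for a, b in zip(bounds, bounds[1:]): seg = camelcase[a:b]  (0 ≤ a ≤ b ≤ len, so the slice is drop/take)
def pvSegs (cs : List Char) (bs : List Nat) : List (List Char) :=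
  (bs.zip bs.tail).map (fun ab => pvLowerHead ((cs.drop ab.1).take (ab.2 - ab.1)))

def case_converter_alt (camelcase : String) (seperator : String) : String :=
  String.mk (PySem.Chars.join seperator.toList
    (pvSegs camelcase.toList (pvBounds camelcase.toList)))

-- ===== PRECONDITION & SPEC =====
-- Pre_ excludes only the empty camelcase, on which A (and B) raise IndexError at [0].
def Pre_case_converter (camelcase : String) (seperator : String) : Prop := camelcase ≠ ""
instance (camelcase : String) (seperator : String) : Decidable (Pre_case_converter camelcase seperator) := by unfold Pre_case_converter; infer_instance
def pvWitness_case_converter : String × String := ("camelCase", "_")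

def Spec_case_converter (camelcase : String) (seperator : String) (out : String) : Prop := out = case_converter_alt camelcase seperator
instance (camelcase : String) (seperator : String) (out : String) : Decidable (Spec_case_converter camelcase seperator out) := by unfold Spec_case_converter; infer_instance

-- ===== CLAIM =====
def Claim_equal_case_converter : Prop := ∀ (camelcase : String) (seperator : String), Dom_case_converter camelcase seperator → Pre_case_converter camelcase seperator → Spec_case_converter camelcase seperator (case_converter camelcase seperator)

-- ===== LEMMAS AND PROOFS =====

-- what one letter contributes to the output
def pvStep (sep : List Char) (ch : Char) : List Char :=
  if PySem.Chars.isupper ch then sep ++ [PySem.Chars.lowerChar ch] else [ch]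

theorem lower_of_not_upper (c : Char) (h : PySem.Chars.isupper c = false) :
    PySem.Chars.lowerChar c = c := by
  simp [PySem.Chars.lowerChar, h]

-- A's foldl appends pvStep for each letter
theorem caseA_foldl (sep : List Char) (cs : List Char) : ∀ (init : List Char),
    cs.foldl (fun acc letter =>
      if PySem.Chars.isupper letter then acc ++ sep ++ [PySem.Chars.lowerChar letter]
      else acc ++ [letter]) init = init ++ cs.flatMap (pvStep sep) := by
  induction cs with
  | nil => intro init; simp
  | cons c cs ih =>
      intro init
      simp only [List.foldl_cons, List.flatMap_cons, ih, pvStep]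
      by_cases h : PySem.Chars.isupper c = true <;> simp [h]

-- shifting every boundary by one and consing a char changes nothing
theorem segs_shift (c : Char) (xs : List Char) : ∀ (bs : List Nat),
    pvSegs (c :: xs) (bs.map (· + 1)) = pvSegs xs bs := by
  intro bs
  induction bs with
  | nil => rfl
  | cons a bs ih =>
      cases bs with
      | nil => rfl
      | cons b bs' =>
          simp only [List.map_cons, pvSegs, List.zip_cons_cons, List.tail_cons, List.map_cons] at *
          refine congrArg₂ _ ?_ ih
          simp [Nat.succ_sub_succ]

-- every upper index is ≥ 1
theorem uppers_ge_one (cs : List Char) : ∀ x ∈ pvUppers cs, 1 ≤ x := by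
  intro x hx
  unfold pvUppers at hx
  have := (List.mem_filter.mp hx).1
  exact (List.mem_range'_1.mp this).1

-- boundary tail of c :: ch :: t in terms of that of ch :: t
theorem bounds_cons (c ch : Char) (t : List Char) :
    pvUppers (c :: ch :: t) ++ [t.length + 2] =
      if PySem.Chars.isupper ch
      then 1 :: (pvUppers (ch :: t) ++ [t.length + 1]).map (· + 1)
      else (pvUppers (ch :: t) ++ [t.length + 1]).map (· + 1) := by
  have h1 : pvUppers (c :: ch :: t)
      = (List.range' 1 (t.length + 1)).filter
          (fun i => PySem.Chars.isupper ((c :: ch :: t).getD i ' ')) := by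
    simp [pvUppers]
  have h2 : List.range' 1 (t.length + 1) = 1 :: List.range' 2 t.length := by rw [List.range'_succ]
  have h3 : List.range' 2 t.length = (List.range' 1 t.length).map (· + 1) := by
    rw [List.range'_eq_map_range, List.range'_eq_map_range, List.map_map]
    refine List.map_congr_left ?_
    intro i _; simp; omega
  have h4 : (List.range' 1 t.length).filter
        (fun i => PySem.Chars.isupper ((ch :: t).getD i ' '))
      = pvUppers (ch :: t) := by simp [pvUppers]
  rw [h1, h2, h3]
  rw [List.filter_cons]
  have h5 : ((List.range' 1 t.length).map (· + 1)).filter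
        (fun i => PySem.Chars.isupper ((c :: ch :: t).getD i ' '))
      = ((List.range' 1 t.length).filter
          (fun i => PySem.Chars.isupper ((ch :: t).getD i ' '))).map (· + 1) := by
    rw [List.filter_map]
    refine congrArg _ (List.filter_congr ?_)
    intro i hi
    have h1i : 1 ≤ i := (List.mem_range'_1.mp hi).1
    obtain ⟨j, rfl⟩ : ∃ j, i = j + 1 := ⟨i - 1, by omega⟩
    simp [Function.comp]
  rw [h5, h4]
  by_cases h : PySem.Chars.isupper ch = true
  · simp [h]
  · simp only [Bool.not_eq_true] at h
    simp [h]

-- joining pieces of a nonempty bounds tail always starts with a piece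
theorem segs_bounds_cons (cs : List Char) :
    ∃ q S, pvSegs cs (pvBounds cs) = q :: S := by
  unfold pvBounds
  rcases h : pvUppers cs with _ | ⟨a, u⟩ <;> simp [pvSegs]

-- one zipped pair peels off the first segment
theorem pvSegs_cons_cons (cs : List Char) (a b : Nat) (bs : List Nat) :
    pvSegs cs (a :: b :: bs)
      = pvLowerHead ((cs.drop a).take (b - a)) :: pvSegs cs (b :: bs) := by
  simp [pvSegs]

-- pulling the head char out of the first joined piece
theorem join_cons_head (sep : List Char) (x : Char) (p : List Char) (S : List (List Char)) :
    PySem.Chars.join sep ((x :: p) :: S) = x :: PySem.Chars.join sep (p :: S) := by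
  cases S with
  | nil => simp [PySem.Chars.join_singleton]
  | cons q S' => rw [PySem.Chars.join_cons_cons, PySem.Chars.join_cons_cons]; simp

-- main invariant: B's staged pipeline produces head-lowered char followed by per-letter steps
theorem caseB_main (sep : List Char) : ∀ (xs : List Char) (c : Char),
    PySem.Chars.join sep (pvSegs (c :: xs) (pvBounds (c :: xs)))
      = PySem.Chars.lowerChar c :: xs.flatMap (pvStep sep) := by
  intro xs
  induction xs with
  | nil =>
      intro c
      simp [pvBounds, pvUppers, pvSegs, pvLowerHead, PySem.Chars.join_singleton]
  | cons ch t ih =>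
      intro c
      have hb : pvBounds (c :: ch :: t)
          = 0 :: (pvUppers (c :: ch :: t) ++ [t.length + 2]) := by
        simp [pvBounds]
      rw [hb, bounds_cons]
      by_cases h : PySem.Chars.isupper ch = true
      · -- ch is uppercase: index 1 is a boundary, the first segment is just [c]
        rw [if_pos h]
        rw [pvSegs_cons_cons]
        have hM : (1 : Nat) :: (pvUppers (ch :: t) ++ [t.length + 1]).map (· + 1)
            = (0 :: (pvUppers (ch :: t) ++ [t.length + 1])).map (· + 1) := by simp
        rw [hM, segs_shift]
        have hbb : pvBounds (ch :: t) = 0 :: (pvUppers (ch :: t) ++ [t.length + 1]) := by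
          simp [pvBounds]
        rw [← hbb]
        obtain ⟨q, S, hqS⟩ := segs_bounds_cons (ch :: t)
        have hih := ih ch
        rw [hqS] at hih ⊢
        have hp : pvLowerHead (((c :: ch :: t).drop 0).take (1 - 0))
            = [PySem.Chars.lowerChar c] := rfl
        rw [hp, PySem.Chars.join_cons_cons, hih]
        simp [pvStep, h]
      · -- ch is not uppercase: it is glued into the first segment
        rw [if_neg (by simp [h])]
        rw [Bool.not_eq_true] at h
        have hex : ∃ b' L', pvUppers (ch :: t) ++ [t.length + 1] = (b' + 1) :: L' := by
          rcases hL : pvUppers (ch :: t) with _ | ⟨a, u⟩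
          · exact ⟨t.length, [], by simp⟩
          · have ha : 1 ≤ a := uppers_ge_one (ch :: t) a (by rw [hL]; exact List.mem_cons_self)
            obtain ⟨a', rfl⟩ : ∃ a', a = a' + 1 := ⟨a - 1, by omega⟩
            exact ⟨a', u ++ [t.length + 1], by simp⟩
        obtain ⟨b', L', hLL⟩ := hex
        rw [hLL, List.map_cons, pvSegs_cons_cons]
        have hseg1 : ((c :: ch :: t).drop 0).take (b' + 1 + 1 - 0) = c :: ch :: t.take b' := by
          simp
        have hshift : pvSegs (c :: ch :: t) ((b' + 1 + 1) :: L'.map (· + 1))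
            = pvSegs (ch :: t) ((b' + 1) :: L') := by
          have := segs_shift c (ch :: t) ((b' + 1) :: L')
          simpa using this
        rw [hseg1, hshift]
        have hbb : pvBounds (ch :: t) = 0 :: ((b' + 1) :: L') := by
          have : pvBounds (ch :: t) = 0 :: (pvUppers (ch :: t) ++ [t.length + 1]) := by
            simp [pvBounds]
          rw [this, hLL]
        have hih := ih ch
        rw [hbb, pvSegs_cons_cons] at hih
        have hseg2 : ((ch :: t).drop 0).take (b' + 1 - 0) = ch :: t.take b' := by simp
        rw [hseg2] at hih
        simp only [pvLowerHead, lower_of_not_upper ch h] at hih ⊢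
        rw [join_cons_head, hih]
        simp [pvStep, h]

theorem core_eq (sep : List Char) (cs : List Char) (h : cs ≠ []) :
    caseA_core sep cs = PySem.Chars.join sep (pvSegs cs (pvBounds cs)) := by
  cases cs with
  | nil => exact absurd rfl h
  | cons c rest =>
      rw [caseB_main]
      show (caseA_core sep (c :: rest)) = _
      simp only [caseA_core]
      rw [caseA_foldl]
      simp

-- ===== VERDICT =====
theorem case_converter_spec : Claim_equal_case_converter := by
  intro camelcase seperator _ hpre
  unfold Spec_case_converter case_converter case_converter_alt
  rw [core_eq]
  intro hnil
  exact hpre (by simp [← String.toList_inj, hnil])
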